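-- pv_equiv track=rewrite | github.com/deepesh5198/LeetCode-Problems | Medium/Partitioning-into-Minimum-Numbers-Deci-Binary-Numbers.py | returnListOfDeciBinary_recursive
-- ===== SOURCE A (Python) =====
-- def returnListOfDeciBinary_recursive(n, res):
--     if n == "0"*len(n):
--         return res
--
--     else:
--         s = "".join("1" if c>"0" else "0" for c in n)
--
--         n = str(int(n) - int(s))
--         res.append(s)
--         return returnListOfDeciBinary_recursive(n, res)
-- ===== SOURCE B (Python) =====
-- def returnListOfDeciBinary_recursive(n, res):
--     digits = [int(c) for c in n]
--     m = max(digits, default=0)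
--     for k in range(m):
--         i = next(j for j, d in enumerate(digits) if d > k)
--         res.append(''.join('1' if d > k else '0' for d in digits[i:]))
--     return res
-- ===== Notes on version B (the rewrite author's own statement) =====
-- stated objective: simpler
-- what changed: A recurses, repeatedly round-tripping the whole string through big-int arithmetic (n = str(int(n) - int(mask))); B reads the answer directly off the digits: one mask per level k < max(digits), marking the digits greater than k, with no recursion, no subtraction and no str/int conversions.
-- intended difference: On digit strings with a leading zero before some nonzero digit (e.g. '007'), A's first appended mask keeps the input's leading zeros ('001') while all its later masks are stripped by the str(int(...)) round-trip; B strips every mask uniformly ('1'), the consistent normal form - A's mixed formatting is an accident of its recursion. — e.g. on returnListOfDeciBinary_recursive("01", []): A returns ["01"], B returns ["1"]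
-- outside the precondition, e.g. on returnListOfDeciBinary_recursive('+5', []): A returns ['01', '1', '1', '1', '1'], B raises ValueError; on returnListOfDeciBinary_recursive(' 7', []): A returns ['01', '1', '1', '1', '1', '1', '1'], B raises ValueError
import Mathlib
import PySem

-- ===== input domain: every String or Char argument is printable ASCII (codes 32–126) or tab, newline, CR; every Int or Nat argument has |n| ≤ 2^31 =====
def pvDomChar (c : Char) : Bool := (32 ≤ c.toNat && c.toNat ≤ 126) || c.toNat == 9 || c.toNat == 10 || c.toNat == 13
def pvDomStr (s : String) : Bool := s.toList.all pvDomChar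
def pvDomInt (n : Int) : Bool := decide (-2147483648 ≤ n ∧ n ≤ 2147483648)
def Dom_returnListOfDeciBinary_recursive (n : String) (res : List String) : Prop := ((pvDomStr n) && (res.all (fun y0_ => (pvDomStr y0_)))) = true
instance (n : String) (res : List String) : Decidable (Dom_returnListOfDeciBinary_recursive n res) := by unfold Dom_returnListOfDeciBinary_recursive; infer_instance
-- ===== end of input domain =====

-- B replaces A's recursion (repeated big-int round-trips n -> int(n) - int(mask) -> str) by a single
-- scan: one mask per level k < max digit, read directly off the digits.  Objective: simpler.
-- Both A and B append to `res` in place (same observable mutation); the theorems are about the return value.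

-- ===== PORT A =====
-- int(x) ported by hand: inside Pre_ every string A passes to int() consists of ASCII digits only,
-- and on those int() is exactly this Horner evaluation (Python's wider int() grammar — sign,
-- whitespace, underscores — is excluded by Pre_ and never reached from a Pre_ input).
def pvIntOfDigits (cs : List Char) : Int :=
  ((cs.foldl (fun a c => 10 * a + (c.toNat - 48)) 0 : Nat) : Int)

-- decimal digit characters of v (helper for str); fuel-guarded structural recursion
-- (fuel v is always enough: v < 10 stops long before v steps)
def pvDigitsOfNatGo (fuel v : Nat) : List Char :=
  match fuel with
  | 0 => [Char.ofNat (48 + v)]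
  | f + 1 =>
    if v < 10 then [Char.ofNat (48 + v)]
    else pvDigitsOfNatGo f (v / 10) ++ [Char.ofNat (48 + v % 10)]

def pvDigitsOfNat (v : Nat) : List Char := pvDigitsOfNatGo v v

-- str(v) ported by hand: '-' then the decimal digits of |v| for negatives, else the decimal digits (exact on every int)
def pvStrOfInt (v : Int) : List Char :=
  if v < 0 then '-' :: pvDigitsOfNat v.natAbs else pvDigitsOfNat v.toNat

def pvAGo (fuel : Nat) (n : String) (res : List String) : List String :=
  match fuel with
  | 0 => res
  | fuel + 1 =>
    if n.toList = List.replicate n.toList.length '0' then res      -- n == "0"*len(n)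
    else
      let s : List Char := n.toList.map (fun c => if '0' < c then '1' else '0')
      pvAGo fuel (String.ofList (pvStrOfInt (pvIntOfDigits n.toList - pvIntOfDigits s)))
        (res ++ [String.ofList s])

-- A recurses on n; on every Pre_ input the depth is (max digit) + 1 ≤ 10, so fuel 10 is exact there
def returnListOfDeciBinary_recursive (n : String) (res : List String) : List String :=
  pvAGo 10 n res

-- ===== PORT B =====
def returnListOfDeciBinary_recursive_alt (n : String) (res : List String) : List String :=
  -- int(c): exact for the digit characters Pre_ admits (Source B raises ValueError on any other)
  let digits : List Int := n.toList.map (fun c => (c.toNat : Int) - 48)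
  let m : Nat := (PySem.List.maxD digits (fun d => d) 0).toNat     -- max(digits, default=0)
  res ++ (List.range m).map (fun (k : Nat) =>
    -- digits[i:] with i = next(j for j, d in ... if d > k)  ==  drop the (≤ k)-prefix
    String.ofList ((digits.dropWhile (fun d => d ≤ (k : Int))).map
      (fun d => if (k : Int) < d then '1' else '0')))

-- ===== PRECONDITION & SPEC =====
-- Pre_ excludes strings containing any non-digit character: A's int() raises ValueError on most of
-- them, and on the few int()-parsable ones (sign/whitespace-prefixed forms such as "+5" or " 7")
-- A's value reflects int()'s lenient grammar while B raises ValueError on the first non-digit.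
def Pre_returnListOfDeciBinary_recursive (n : String) (res : List String) : Prop :=
  n.toList.all (fun c => '0' ≤ c && c ≤ '9') = true
instance (n : String) (res : List String) : Decidable (Pre_returnListOfDeciBinary_recursive n res) := by
  unfold Pre_returnListOfDeciBinary_recursive; infer_instance

def pvWitness_returnListOfDeciBinary_recursive : String × List String := ("12", [])

-- On digit strings with a leading zero before some nonzero digit, A's FIRST appended mask keeps the
-- input's leading zeros (A("007",[]) = ["001","1","1","1","1","1","1"]) while every later mask is
-- stripped by its str(int(...)) round-trip; B strips every mask uniformly (["1","1","1","1","1","1","1"]),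
-- the consistent normal form — A's mixed formatting is an accident of recursing on str(int(n) - int(s)).
def D_returnListOfDeciBinary_recursive (n : String) (res : List String) : Prop :=
  n.toList.head? = some '0' ∧ n.toList.all (fun c => c == '0') = false
instance (n : String) (res : List String) : Decidable (D_returnListOfDeciBinary_recursive n res) := by
  unfold D_returnListOfDeciBinary_recursive; infer_instance

def Spec_returnListOfDeciBinary_recursive (n : String) (res : List String) (out : List String) : Prop :=
  ¬ D_returnListOfDeciBinary_recursive n res → out = returnListOfDeciBinary_recursive_alt n res
instance (n : String) (res : List String) (out : List String) : Decidable (Spec_returnListOfDeciBinary_recursive n res out) := by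
  unfold Spec_returnListOfDeciBinary_recursive; infer_instance

def pvDiffWitness_returnListOfDeciBinary_recursive : String × List String := ("01", [])
def pvDiffWitnessOut_returnListOfDeciBinary_recursive : (List String) × (List String) := (["01"], ["1"])

-- ===== CLAIM (what is proved, stated in full; the proofs are below) =====
def Claim_unchanged_returnListOfDeciBinary_recursive : Prop := ∀ (n : String) (res : List String), Dom_returnListOfDeciBinary_recursive n res → Pre_returnListOfDeciBinary_recursive n res → Spec_returnListOfDeciBinary_recursive n res (returnListOfDeciBinary_recursive n res)
def Claim_changed_returnListOfDeciBinary_recursive : Prop := Dom_returnListOfDeciBinary_recursive (pvDiffWitness_returnListOfDeciBinary_recursive.1) (pvDiffWitness_returnListOfDeciBinary_recursive.2) ∧ Pre_returnListOfDeciBinary_recursive (pvDiffWitness_returnListOfDeciBinary_recursive.1) (pvDiffWitness_returnListOfDeciBinary_recursive.2) ∧ D_returnListOfDeciBinary_recursive (pvDiffWitness_returnListOfDeciBinary_recursive.1) (pvDiffWitness_returnListOfDeciBinary_recursive.2) ∧ returnListOfDeciBinary_recursive (pvDiffWitness_returnListOfDeciBinary_recursive.1) (pvDiffWitness_returnListOfDeciBinary_recursive.2)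 = pvDiffWitnessOut_returnListOfDeciBinary_recursive.1 ∧ returnListOfDeciBinary_recursive_alt (pvDiffWitness_returnListOfDeciBinary_recursive.1) (pvDiffWitness_returnListOfDeciBinary_recursive.2) = pvDiffWitnessOut_returnListOfDeciBinary_recursive.2 ∧ pvDiffWitnessOut_returnListOfDeciBinary_recursive.1 ≠ pvDiffWitnessOut_returnListOfDeciBinary_recursive.2
def Claim_exact_returnListOfDeciBinary_recursive : Prop := ∀ (n : String) (res : List String), Dom_returnListOfDeciBinary_recursive n res → Pre_returnListOfDeciBinary_recursive n res → D_returnListOfDeciBinary_recursive n res → returnListOfDeciBinary_recursive n res ≠ returnListOfDeciBinary_recursive_alt n res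

-- ===== LEMMAS AND PROOFS =====

-- digit value of a digit character / digit character of a digit value
def pvDval (c : Char) : Nat := c.toNat - 48
def pvChr (d : Nat) : Char := Char.ofNat (48 + d)
-- value of a (most-significant-first) digit list, and its maximum digit
def pvVal (t : List Nat) : Nat := t.foldl (fun a d => 10 * a + d) 0
def pvMax (t : List Nat) : Nat := t.foldl (fun a d => max a d) 0

lemma pvChr_toNat {d : Nat} (h : d ≤ 9) : (pvChr d).toNat = 48 + d := by
  interval_cases d <;> decide

lemma pvChr_eq_zero_iff {d : Nat} (h : d ≤ 9) : pvChr d = '0' ↔ d = 0 := by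
  interval_cases d <;> decide

lemma pvChr_lt_iff {d : Nat} (h : d ≤ 9) : '0' < pvChr d ↔ 0 < d := by
  interval_cases d <;> decide

lemma pvChr_dval {c : Char} (h1 : '0' ≤ c) (h2 : c ≤ '9') : pvChr (pvDval c) = c := by
  have h48 : 48 ≤ c.toNat := h1
  unfold pvChr pvDval
  rw [Nat.add_sub_cancel' h48, Char.ofNat_toNat]

lemma pvDval_le {c : Char} (h1 : '0' ≤ c) (h2 : c ≤ '9') : pvDval c ≤ 9 := by
  have h48 : 48 ≤ c.toNat := h1
  have h57 : c.toNat ≤ 57 := h2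
  unfold pvDval; omega

lemma pvVal_acc (t : List Nat) (a : Nat) :
    t.foldl (fun a d => 10 * a + d) a = a * 10 ^ t.length + pvVal t := by
  induction t generalizing a with
  | nil => simp [pvVal]
  | cons d t ih =>
    show List.foldl _ (10 * a + d) t = _
    rw [ih (10 * a + d)]
    have hv : pvVal (d :: t) = d * 10 ^ t.length + pvVal t := by
      show List.foldl _ (10 * 0 + d) t = _
      rw [ih (10 * 0 + d)]; ring_nf
    rw [hv]
    simp [List.length_cons, pow_succ]; ring

lemma pvVal_cons (d : Nat) (t : List Nat) :
    pvVal (d :: t) = d * 10 ^ t.length + pvVal t := by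
  show List.foldl _ (10 * 0 + d) t = _
  rw [pvVal_acc]; ring_nf

lemma pvVal_append (t : List Nat) (d : Nat) : pvVal (t ++ [d]) = 10 * pvVal t + d := by
  simp [pvVal, List.foldl_append]

lemma pvVal_pos {t : List Nat} {d : Nat} (h : t.head? = some d) (hd : 0 < d) : 0 < pvVal t := by
  cases t with
  | nil => simp at h
  | cons e t =>
    simp at h; subst h
    rw [pvVal_cons]
    have : 0 < 10 ^ t.length := pow_pos (by omega) _
    nlinarith

lemma pvGo_congr : ∀ (f g v : Nat), v ≤ f → v ≤ g → pvDigitsOfNatGo f v = pvDigitsOfNatGo g v := by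
  intro f
  induction f with
  | zero =>
    intro g v hf _
    interval_cases v
    cases g <;> simp [pvDigitsOfNatGo]
  | succ f ih =>
    intro g v hf hg
    cases g with
    | zero =>
      interval_cases v <;> simp [pvDigitsOfNatGo]
    | succ g =>
      show (if v < 10 then _ else _) = (if v < 10 then _ else _)
      by_cases hv : v < 10
      · rw [if_pos hv, if_pos hv]
      · rw [if_neg hv, if_neg hv]
        have hd : v / 10 < v := Nat.div_lt_self (by omega) (by omega)
        rw [ih g (v / 10) (by omega) (by omega) ]

lemma pvDigitsOfNat_eq (v : Nat) :
    pvDigitsOfNat v = if v < 10 then [Char.ofNat (48 + v)]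
      else pvDigitsOfNat (v / 10) ++ [Char.ofNat (48 + v % 10)] := by
  unfold pvDigitsOfNat
  by_cases hv : v < 10
  · rw [if_pos hv]
    cases v <;> simp [pvDigitsOfNatGo] <;> omega
  · rw [if_neg hv]
    have hd : v / 10 < v := Nat.div_lt_self (by omega) (by omega)
    obtain ⟨f, rfl⟩ : ∃ f, v = f + 1 := ⟨v - 1, by omega⟩
    show (if _ < 10 then _ else _) = _
    rw [if_neg hv, pvGo_congr f ((f+1)/10) ((f+1)/10) (by omega) (by omega)]

lemma pvDigits_repr : ∀ (t : List Nat), (∀ d ∈ t, d ≤ 9) → t ≠ [] →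
    (∀ d, t.head? = some d → 0 < d) → pvDigitsOfNat (pvVal t) = t.map pvChr := by
  intro t
  induction t using List.reverseRecOn with
  | nil => intro _ h; simp at h
  | append_singleton es d ih =>
    intro h9 _ hh
    by_cases he : es = []
    · subst he
      simp only [List.nil_append] at h9 hh ⊢
      have hd : d ≤ 9 := h9 d (by simp)
      have hv : pvVal [d] = d := by simp [pvVal]
      rw [hv, pvDigitsOfNat_eq, if_pos (by omega)]
      simp [pvChr]
    · have hd : d ≤ 9 := h9 d (by simp)
      have h9' : ∀ e ∈ es, e ≤ 9 := fun e hee => h9 e (by simp [hee])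
      have hh' : ∀ e, es.head? = some e → 0 < e := by
        intro e hee
        apply hh e
        rw [List.head?_append_of_ne_nil] <;> simp_all
      obtain ⟨e, hee⟩ : ∃ e, es.head? = some e := by
        cases es with | nil => simp_all | cons a l => exact ⟨a, rfl⟩
      have hpos : 0 < pvVal es := pvVal_pos hee (hh' e hee)
      rw [pvVal_append, pvDigitsOfNat_eq, if_neg (by omega)]
      have hdiv : (10 * pvVal es + d) / 10 = pvVal es := by omega
      have hmod : (10 * pvVal es + d) % 10 = d := by omega
      rw [hdiv, hmod, ih h9' he hh']
      simp [pvChr]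

-- one subtraction step, digit-wise:  val t - val (indicator t) = val (t.map (· - 1))
lemma pvVal_sub (t : List Nat) :
    (pvVal t : Int) - (pvVal (t.map (fun d => if 0 < d then 1 else 0)) : Int)
      = (pvVal (t.map (fun d => d - 1)) : Int) := by
  induction t using List.reverseRecOn with
  | nil => simp [pvVal]
  | append_singleton es d ih =>
    rw [List.map_append, List.map_append]
    simp only [List.map_cons, List.map_nil]
    rw [pvVal_append, pvVal_append, pvVal_append]
    have hd : (d : Int) - (if 0 < d then (1 : Nat) else 0) = ((d - 1 : Nat) : Int) := by
      split_ifs <;> omega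
    push_cast
    push_cast at ih
    split_ifs at hd ⊢ <;> omega

lemma pvVal_trim (t : List Nat) : pvVal (t.dropWhile (fun d => d == 0)) = pvVal t := by
  induction t with
  | nil => rfl
  | cons d t ih =>
    by_cases h : d = 0
    · subst h
      rw [List.dropWhile_cons_of_pos (by simp), ih, pvVal_cons]
      omega
    · rw [List.dropWhile_cons_of_neg (by simp [h])]

lemma pvMax_cons (d : Nat) (t : List Nat) : pvMax (d :: t) = max d (pvMax t) := by
  have key : ∀ (l : List Nat) (a : Nat), l.foldl (fun a d => max a d) a = max a (pvMax l) := by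
    intro l
    induction l with
    | nil => intro a; simp [pvMax]
    | cons x l ih =>
      intro a
      show List.foldl _ (max a x) l = _
      rw [ih (max a x)]
      have hx : pvMax (x :: l) = max x (pvMax l) := by
        show List.foldl _ (max 0 x) l = _
        rw [ih (max 0 x)]; omega
      rw [hx]; omega
  show List.foldl _ (max 0 d) t = _
  rw [key t (max 0 d)]; omega

lemma pvMax_eq_zero_iff (t : List Nat) : pvMax t = 0 ↔ ∀ d ∈ t, d = 0 := by
  induction t with
  | nil => simp [pvMax]
  | cons d t ih => rw [pvMax_cons]; simp [Nat.max_eq_zero_iff, ih]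

lemma pvMax_map_sub (t : List Nat) : pvMax (t.map (fun d => d - 1)) = pvMax t - 1 := by
  induction t with
  | nil => simp [pvMax]
  | cons d t ih =>
    simp only [List.map_cons]
    rw [pvMax_cons, pvMax_cons, ih]; omega

lemma pvMax_trim (t : List Nat) : pvMax (t.dropWhile (fun d => d == 0)) = pvMax t := by
  induction t with
  | nil => rfl
  | cons d t ih =>
    by_cases h : d = 0
    · subst h
      rw [List.dropWhile_cons_of_pos (by simp), ih, pvMax_cons]; omega
    · rw [List.dropWhile_cons_of_neg (by simp [h])]

lemma pvMax_le (t : List Nat) {d : Nat} (h : d ∈ t) : d ≤ pvMax t := by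
  induction t with
  | nil => simp at h
  | cons e t ih =>
    rw [pvMax_cons]
    rcases List.mem_cons.mp h with rfl | h'
    · omega
    · have := ih h'; omega

lemma pvDropWhile_dropWhile {p q : Nat → Bool} (h : ∀ x, q x = true → p x = true)
    (l : List Nat) : (l.dropWhile q).dropWhile p = l.dropWhile p := by
  induction l with
  | nil => rfl
  | cons d t ih =>
    by_cases hq : q d = true
    · rw [List.dropWhile_cons_of_pos hq, ih, List.dropWhile_cons_of_pos (h d hq)]
    · rw [List.dropWhile_cons_of_neg hq]

-- the core correspondence: A's recursion on the digit list t produces exactly B's masks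
lemma pvMain : ∀ (fuel : Nat) (t : List Nat) (res : List String),
    (∀ d ∈ t, d ≤ 9) →
    (∀ d, t.head? = some d → d = 0 → ∀ e ∈ t, e = 0) →
    pvMax t < fuel →
    pvAGo fuel (String.ofList (t.map pvChr)) res =
      res ++ (List.range (pvMax t)).map (fun k =>
        String.ofList ((t.dropWhile (fun d => d ≤ k)).map (fun d => if k < d then '1' else '0'))) := by
  intro fuel
  induction fuel with
  | zero => intro t res _ _ hf; omega
  | succ fuel ih =>
    intro t res h9 hz hf
    rw [pvAGo]
    simp only [String.toList_ofList]
    by_cases h0 : ∀ d ∈ t, d = 0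
    · rw [if_pos ?_, (pvMax_eq_zero_iff t).mpr h0]
      · simp
      · rw [List.eq_replicate_iff]
        refine ⟨rfl, ?_⟩
        intro b hb
        obtain ⟨d, hd, rfl⟩ := List.mem_map.mp hb
        rw [h0 d hd]; rfl
    · push_neg at h0
      obtain ⟨w, hw, hwne⟩ := h0
      obtain ⟨h, tt, rfl⟩ : ∃ h tt, t = h :: tt := by
        cases t with | nil => simp_all | cons a l => exact ⟨a, l, rfl⟩
      have hh0 : h ≠ 0 := by
        intro he
        exact hwne (hz h rfl he w hw)
      set t : List Nat := h :: tt with hT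
      have hmx : 0 < pvMax t := by
        have := pvMax_le t hw; omega
      -- not the all-zero string
      rw [if_neg ?notrep]
      case notrep =>
        intro hrep
        rw [List.eq_replicate_iff] at hrep
        have hmem : h ∈ t := by rw [hT]; exact List.mem_cons_self ..
        have : pvChr h = '0' := hrep.2 _ (List.mem_map.mpr ⟨h, hmem, rfl⟩)
        exact hh0 ((pvChr_eq_zero_iff (h9 h hmem)).mp this)
      -- the first mask, as characters
      have hs : (t.map pvChr).map (fun c => if '0' < c then '1' else '0')
          = (t.map (fun d => if 0 < d then (1:Nat) else 0)).map pvChr := by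
        rw [List.map_map, List.map_map]
        refine List.map_congr_left (fun d hd => ?_)
        show (if '0' < pvChr d then '1' else '0') = pvChr (if 0 < d then 1 else 0)
        by_cases hdp : 0 < d
        · rw [if_pos ((pvChr_lt_iff (h9 d hd)).mpr hdp), if_pos hdp]; rfl
        · rw [if_neg (fun hc => hdp ((pvChr_lt_iff (h9 d hd)).mp hc)), if_neg hdp]; rfl
      -- int() of a pvChr-rendered digit list is its value
      have hval : ∀ (u : List Nat), (∀ d ∈ u, d ≤ 9) →
          pvIntOfDigits (u.map pvChr) = (pvVal u : Int) := by
        intro u hu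
        unfold pvIntOfDigits
        congr 1
        rw [List.foldl_map]
        rw [PySem.List.foldl_congr_mem u _ (fun a d => 10 * a + d) 0
          (fun acc x hx => by
            show 10 * acc + ((pvChr x).toNat - 48) = 10 * acc + x
            rw [pvChr_toNat (hu x hx)]; omega)]
        rfl
      rw [hs, hval t h9, hval _ (by
        intro d hd
        obtain ⟨e, _, rfl⟩ := List.mem_map.mp hd
        split <;> omega)]
      rw [pvVal_sub t]
      -- str() of the nonnegative difference
      unfold pvStrOfInt
      rw [if_neg (by omega), Int.toNat_natCast]
      set t0 : List Nat := t.map (fun d => d - 1) with hT0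
      have h9' : ∀ d ∈ t0, d ≤ 9 := by
        intro d hd
        obtain ⟨e, he, rfl⟩ := List.mem_map.mp hd
        have := h9 e he; omega
      have hmax0 : pvMax t0 = pvMax t - 1 := pvMax_map_sub t
      -- the common first mask
      have hmask0 : (t.map (fun d => if 0 < d then (1:Nat) else 0)).map pvChr
          = (t.dropWhile (fun d => d ≤ 0)).map (fun d => if 0 < d then '1' else '0') := by
        have hdw : t.dropWhile (fun d => d ≤ 0) = t := by
          rw [hT]
          exact List.dropWhile_cons_of_neg (by simp only [decide_eq_true_eq]; omega)
        rw [hdw, List.map_map]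
        refine List.map_congr_left (fun d _ => ?_)
        show pvChr (if 0 < d then 1 else 0) = (if 0 < d then '1' else '0')
        by_cases hdp : 0 < d
        · rw [if_pos hdp, if_pos hdp]; rfl
        · rw [if_neg hdp, if_neg hdp]; rfl
      have hmask0c : List.map (pvChr ∘ fun d => if 0 < d then (1:Nat) else 0) t
          = (t.dropWhile (fun d => d ≤ 0)).map (fun d => if 0 < d then '1' else '0') := by
        rw [← List.map_map]; exact hmask0
      by_cases htr : t0.dropWhile (fun d => d == 0) = []
      · -- the next value is 0: the recursion stops right after this step
        have hval0 : pvVal t0 = 0 := by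
          rw [← pvVal_trim t0, htr]; rfl
        have hM1 : pvMax t = 1 := by
          have : pvMax t0 = 0 := by rw [← pvMax_trim t0, htr]; rfl
          omega
        have hd0 : pvDigitsOfNat (pvVal t0) = [0].map pvChr := by
          rw [hval0]; decide
        have hzero : pvMax ([0] : List Nat) = 0 := rfl
        rw [hd0, ih [0] _ (by simp) (by simp) (by rw [hzero]; omega)]
        rw [hzero, hM1]
        simp only [List.range_zero, List.map_nil, List.append_nil, List.range_one, List.map_cons]
        rw [hmask0]
      · -- the next value is the trimmed digit list t'
        set t' : List Nat := t0.dropWhile (fun d => d == 0) with hT'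
        have h9'' : ∀ d ∈ t', d ≤ 9 :=
          fun d hd => h9' d ((List.dropWhile_sublist _).mem hd)
        have hhead : ∀ d, t'.head? = some d → 0 < d := by
          intro d hd
          have hthis := List.head?_dropWhile_not (fun d => d == 0) t0
          rw [← hT', hd] at hthis
          simp at hthis
          omega
        have hvt : pvVal t0 = pvVal t' := (pvVal_trim t0).symm
        have hmt : pvMax t' = pvMax t - 1 := by
          rw [hT', pvMax_trim t0, hmax0]
        have hrepr : pvDigitsOfNat (pvVal t0) = t'.map pvChr := by
          rw [hvt]
          exact pvDigits_repr t' h9'' htr hhead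
        rw [hrepr, ih t' _ h9''
          (fun d hd hd0 => absurd (hhead d hd) (by omega))
          (by omega)]
        obtain ⟨m, hm⟩ : ∃ m, pvMax t = m + 1 := ⟨pvMax t - 1, by omega⟩
        rw [hmt, hm, Nat.add_sub_cancel, List.range_succ_eq_map]
        simp only [List.map_cons, List.map_map, List.append_assoc, List.singleton_append]
        congr 1
        congr 1
        · exact congrArg _ hmask0c
        · refine List.map_congr_left (fun k _ => ?_)
          show String.ofList ((t'.dropWhile (fun d => d ≤ k)).map (fun d => if k < d then '1' else '0'))
              = String.ofList ((t.dropWhile (fun d => d ≤ (k+1))).map (fun d => if (k+1) < d then '1' else '0'))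
          congr 1
          have h1 : t'.dropWhile (fun d => d ≤ k) = t0.dropWhile (fun d => d ≤ k) := by
            rw [hT']
            exact pvDropWhile_dropWhile (fun x hx => by simp_all) t0
          rw [h1, hT0, List.dropWhile_map, List.map_map]
          have hp : ((fun (d : Nat) => decide (d ≤ k)) ∘ fun d => d - 1)
              = fun d => decide (d ≤ k + 1) := by
            funext d
            simp only [Function.comp_apply, decide_eq_decide]
            omega
          rw [hp]
          refine (List.map_congr_left (fun d _ => ?_)).symm
          show (if k + 1 < d then '1' else '0')
              = ((fun d => if k < d then '1' else '0') ∘ fun d => d - 1) d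
          simp only [Function.comp_apply]
          by_cases hkd : k + 1 < d
          · rw [if_pos hkd, if_pos (by omega)]
          · rw [if_neg hkd, if_neg (by omega)]

-- max(digits, default=0) over the Int-cast digit list is the Nat maximum, cast
lemma pvMaxD_int (t : List Nat) :
    PySem.List.maxD (t.map (fun (d : Nat) => (d : Int))) (fun d => d) 0 = ((pvMax t : Nat) : Int) := by
  cases t with
  | nil => simp [PySem.List.maxD, PySem.List.max?, pvMax]
  | cons d l =>
    rw [List.map_cons]
    unfold PySem.List.maxD
    rw [PySem.List.max?_id_cons]
    simp only [Option.getD_some]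
    have key : ∀ (l : List Nat) (a : Nat),
        List.foldl max ((a : Nat) : Int) (l.map (fun (d : Nat) => (d : Int)))
          = ((l.foldl (fun a d => max a d) a : Nat) : Int) := by
      intro l
      induction l with
      | nil => intro a; simp
      | cons x l ihl =>
        intro a
        simp only [List.map_cons, List.foldl_cons]
        rw [← Nat.cast_max, ihl (max a x)]
    rw [key l d]
    have hfold : pvMax (d :: l) = l.foldl (fun a d => max a d) d := by
      show List.foldl _ (max 0 d) l = _
      rw [Nat.zero_max]
    rw [hfold]

-- B's return value, over the digit list
lemma pvBside (n : String) (res : List String)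
    (hdig : ∀ c ∈ n.toList, '0' ≤ c ∧ c ≤ '9') :
    returnListOfDeciBinary_recursive_alt n res =
      res ++ (List.range (pvMax (n.toList.map pvDval))).map (fun k =>
        String.ofList (((n.toList.map pvDval).dropWhile (fun d => d ≤ k)).map
          (fun d => if k < d then '1' else '0'))) := by
  simp only [returnListOfDeciBinary_recursive_alt]
  have hdigits : n.toList.map (fun c => (c.toNat : Int) - 48)
      = (n.toList.map pvDval).map (fun (d : Nat) => (d : Int)) := by
    rw [List.map_map]
    refine List.map_congr_left (fun c hc => ?_)
    have h48 : 48 ≤ c.toNat := (hdig c hc).1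
    show (c.toNat : Int) - 48 = ((c.toNat - 48 : Nat) : Int)
    omega
  rw [hdigits, pvMaxD_int, Int.toNat_natCast]
  congr 1
  refine List.map_congr_left (fun k _ => ?_)
  congr 1
  rw [List.dropWhile_map, List.map_map]
  have hp : ((fun d => decide (d ≤ (k : Int))) ∘ fun (d : Nat) => (d : Int))
      = fun (d : Nat) => decide (d ≤ k) := by
    funext d
    simp only [Function.comp_apply, decide_eq_decide]
    exact Nat.cast_le
  rw [hp]
  refine (List.map_congr_left (fun d _ => ?_)).symm
  show (if k < d then '1' else '0')
      = ((fun x => if (k : Int) < x then '1' else '0') ∘ fun (d : Nat) => (d : Int)) d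
  simp only [Function.comp_apply]
  by_cases hkd : k < d
  · rw [if_pos hkd, if_pos (by exact_mod_cast hkd)]
  · rw [if_neg hkd, if_neg (by exact_mod_cast hkd)]

lemma pvMax_le_nine {t : List Nat} (h9 : ∀ d ∈ t, d ≤ 9) : pvMax t ≤ 9 := by
  induction t with
  | nil => simp [pvMax]
  | cons d t ih =>
    rw [pvMax_cons]
    have h1 := h9 d (by simp)
    have h2 := ih (fun e he => h9 e (by simp [he]))
    omega

-- pvAGo only ever appends to res
lemma pvAGo_shift : ∀ (fuel : Nat) (n : String) (res : List String),
    pvAGo fuel n res = res ++ pvAGo fuel n [] := by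
  intro fuel
  induction fuel with
  | zero => intro n res; simp [pvAGo]
  | succ fuel ih =>
    intro n res
    rw [pvAGo, pvAGo]
    by_cases hb : n.toList = List.replicate n.toList.length '0'
    · rw [if_pos hb, if_pos hb]; simp
    · rw [if_neg hb, if_neg hb]
      rw [ih _ (res ++ _), ih _ ([] ++ _)]
      simp

-- the digit-character facts shared by the final theorems
lemma pvDigChars (n : String)
    (hpre : ∀ c ∈ n.toList, (decide ('0' ≤ c) && decide (c ≤ '9')) = true) :
    (∀ c ∈ n.toList, '0' ≤ c ∧ c ≤ '9') ∧
    (∀ d ∈ n.toList.map pvDval, d ≤ 9) ∧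
    (n.toList.map pvDval).map pvChr = n.toList := by
  have hdig : ∀ c ∈ n.toList, '0' ≤ c ∧ c ≤ '9' := by
    intro c hc
    have := hpre c hc
    simpa using this
  refine ⟨hdig, ?_, ?_⟩
  · intro d hd
    obtain ⟨c, hc, rfl⟩ := List.mem_map.mp hd
    exact pvDval_le (hdig c hc).1 (hdig c hc).2
  · rw [List.map_map]
    have h1 : List.map (pvChr ∘ pvDval) n.toList = List.map (fun c => c) n.toList :=
      List.map_congr_left (fun c hc => pvChr_dval (hdig c hc).1 (hdig c hc).2)
    rw [h1]
    simp

-- ===== VERDICT PROOFS =====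
theorem returnListOfDeciBinary_recursive_spec : Claim_unchanged_returnListOfDeciBinary_recursive := by
  unfold Claim_unchanged_returnListOfDeciBinary_recursive
  intro n res _ hpre
  unfold Spec_returnListOfDeciBinary_recursive
  intro hnd
  unfold Pre_returnListOfDeciBinary_recursive at hpre
  unfold D_returnListOfDeciBinary_recursive at hnd
  rw [List.all_eq_true] at hpre
  obtain ⟨hdig, h9, hchr⟩ := pvDigChars n hpre
  have hz : ∀ d, (n.toList.map pvDval).head? = some d → d = 0 →
      ∀ e ∈ n.toList.map pvDval, e = 0 := by
    intro d hdh hd0 e he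
    rw [List.head?_map] at hdh
    obtain ⟨c, hc, rfl⟩ : ∃ c, n.toList.head? = some c ∧ pvDval c = d := by
      cases hh : n.toList.head? with
      | none => rw [hh] at hdh; simp at hdh
      | some c => rw [hh] at hdh; exact ⟨c, rfl, by simpa using hdh⟩
    have hcm : c ∈ n.toList := List.mem_of_mem_head? hc
    have hc0 : c = '0' := by
      have hcd := pvChr_dval (hdig c hcm).1 (hdig c hcm).2
      rw [← hcd, hd0]; rfl
    have hall : n.toList.all (fun c => c == '0') = true := by
      by_contra hfalse
      exact hnd ⟨hc0 ▸ hc, by simpa using hfalse⟩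
    rw [List.all_eq_true] at hall
    obtain ⟨c', hc', rfl⟩ := List.mem_map.mp he
    have hc'0 : c' = '0' := by simpa using hall c' hc'
    rw [hc'0]; rfl
  have hA : returnListOfDeciBinary_recursive n res
      = pvAGo 10 (String.ofList ((n.toList.map pvDval).map pvChr)) res := by
    rw [hchr, String.ofList_toList]
    rfl
  rw [hA, pvMain 10 _ res h9 hz (by have := pvMax_le_nine h9; omega), pvBside n res hdig]

theorem returnListOfDeciBinary_recursive_changed : Claim_changed_returnListOfDeciBinary_recursive := by
  unfold Claim_changed_returnListOfDeciBinary_recursive; decide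

theorem returnListOfDeciBinary_recursive_tight : Claim_exact_returnListOfDeciBinary_recursive := by
  unfold Claim_exact_returnListOfDeciBinary_recursive
  intro n res _ hpre hd heq
  obtain ⟨hh, hnz⟩ := hd
  unfold Pre_returnListOfDeciBinary_recursive at hpre
  rw [List.all_eq_true] at hpre
  obtain ⟨hdig, h9, hchr⟩ := pvDigChars n hpre
  obtain ⟨c0, hc0m, hc0⟩ : ∃ c ∈ n.toList, c ≠ '0' := by
    by_contra hall
    push_neg at hall
    have hT : n.toList.all (fun c => c == '0') = true := by
      rw [List.all_eq_true]; intro c hc; simpa using hall c hc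
    rw [hT] at hnz
    cases hnz
  have hmx : 0 < pvMax (n.toList.map pvDval) := by
    have hmem : pvDval c0 ∈ n.toList.map pvDval := List.mem_map.mpr ⟨c0, hc0m, rfl⟩
    have hle := pvMax_le _ hmem
    have hne0 : pvDval c0 ≠ 0 := by
      intro h0
      apply hc0
      have hcd := pvChr_dval (hdig c0 hc0m).1 (hdig c0 hc0m).2
      rw [← hcd, h0]; rfl
    omega
  rw [pvBside n res hdig] at heq
  have hA : ∃ rest, returnListOfDeciBinary_recursive n res
      = res ++ ([String.ofList (n.toList.map (fun c => if '0' < c then '1' else '0'))] ++ rest) := by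
    have h10 : returnListOfDeciBinary_recursive n res = pvAGo (9 + 1) n res := rfl
    rw [h10, pvAGo]
    rw [if_neg ?_]
    · exact ⟨_, by rw [pvAGo_shift, List.append_assoc]⟩
    · intro hrep
      rw [List.eq_replicate_iff] at hrep
      exact hc0 (hrep.2 _ hc0m)
  obtain ⟨rest, hA⟩ := hA
  rw [hA] at heq
  have he1 : (res ++ ([String.ofList (n.toList.map (fun c => if '0' < c then '1' else '0'))] ++ rest))[res.length]?
      = some (String.ofList (n.toList.map (fun c => if '0' < c then '1' else '0'))) := by
    rw [List.getElem?_append_right (le_refl _)]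
    simp
  obtain ⟨m, hm⟩ : ∃ m, pvMax (n.toList.map pvDval) = m + 1 :=
    ⟨pvMax (n.toList.map pvDval) - 1, by omega⟩
  have he2 : (res ++ (List.range (pvMax (n.toList.map pvDval))).map (fun k =>
        String.ofList (((n.toList.map pvDval).dropWhile (fun d => d ≤ k)).map
          (fun d => if k < d then '1' else '0'))))[res.length]?
      = some (String.ofList (((n.toList.map pvDval).dropWhile (fun d => d ≤ 0)).map
          (fun d => if 0 < d then '1' else '0'))) := by
    rw [List.getElem?_append_right (le_refl _)]
    rw [hm, List.range_succ_eq_map]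
    simp
  have hsome : some (String.ofList (n.toList.map (fun c => if '0' < c then '1' else '0')))
      = some (String.ofList (((n.toList.map pvDval).dropWhile (fun d => d ≤ 0)).map
          (fun d => if 0 < d then '1' else '0'))) := by
    rw [← he1, heq, he2]
  have hlist : n.toList.map (fun c => if '0' < c then '1' else '0')
      = ((n.toList.map pvDval).dropWhile (fun d => d ≤ 0)).map
          (fun d => if 0 < d then '1' else '0') := by
    have h1 := Option.some.inj hsome
    have h2 := congrArg String.toList h1
    simpa [String.toList_ofList] using h2
  have hheads := congrArg List.head? hlist
  rw [List.head?_map, List.head?_map, hh] at hheads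
  cases hdW : (n.toList.map pvDval).dropWhile (fun d => d ≤ 0) with
  | nil =>
    rw [hdW] at hheads
    simp at hheads
  | cons e es =>
    have hE : 0 < e := by
      have hthis := List.head?_dropWhile_not (fun d => decide (d ≤ 0)) (n.toList.map pvDval)
      rw [hdW] at hthis
      simp at hthis
      omega
    rw [hdW] at hheads
    simp only [Option.map_some, List.head?_cons] at hheads
    have h01 := Option.some.inj hheads
    rw [if_neg (by decide), if_pos hE] at h01
    exact absurd h01 (by decide)
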